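-- pv_equiv track=rewrite | github.com/GalinaPimkina/Average-report | main.py | get_brand_rating_data
-- ===== SOURCE A (Python) =====
-- def get_brand_rating_data(data: dict):
--     rating_dct = {}
--
--     for product in data:
--         brand = data[product]['brand']
--         rating = data[product]['rating']
--
--         if brand not in rating_dct:
--             rating_dct[brand] = []
--
--         rating_dct[brand].append(rating)
--
--     return rating_dct
-- ===== SOURCE B (Python) =====
-- def get_brand_rating_data(data: dict):
--     brands = dict.fromkeys(data[p]['brand'] for p in data)
--     return {b: [data[p]['rating'] for p in data if data[p]['brand'] == b]
--             for b in brands}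
-- ===== Notes on version B (the rewrite author's own statement) =====
-- stated objective: idiomatic
-- what changed: Replaced A's single-pass dict accumulation (insert-empty-then-append per product) by two comprehensions: an ordered-distinct brand index (dict.fromkeys) and, per brand, one filtering rescan of the products collecting its ratings.
import Mathlib
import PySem

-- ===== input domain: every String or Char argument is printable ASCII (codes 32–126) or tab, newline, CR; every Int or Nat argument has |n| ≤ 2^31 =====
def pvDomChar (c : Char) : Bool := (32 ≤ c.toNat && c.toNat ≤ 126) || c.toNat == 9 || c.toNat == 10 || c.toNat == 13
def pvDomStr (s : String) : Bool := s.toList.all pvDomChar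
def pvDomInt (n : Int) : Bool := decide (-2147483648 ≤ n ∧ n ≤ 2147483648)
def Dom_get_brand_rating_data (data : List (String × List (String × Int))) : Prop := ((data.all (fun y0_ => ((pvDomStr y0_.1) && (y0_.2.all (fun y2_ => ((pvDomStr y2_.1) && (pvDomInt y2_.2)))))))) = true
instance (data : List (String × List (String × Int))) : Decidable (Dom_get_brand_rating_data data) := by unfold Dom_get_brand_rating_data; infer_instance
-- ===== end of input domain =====

-- B replaces A's single-pass dict accumulation by an idiomatic index-then-filter pair of
-- comprehensions (ordered distinct brands, then one filtering pass per brand); objective: idiomatic.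

-- shared helper: pd['key'] on an inner dict; total form, exact under Pre_ (key present, keys unique)
def pvLookup (pd : List (String × Int)) (k : String) : Int :=
  ((PySem.Dict.mk pd).get? k).getD 0

-- ===== PORT A =====
def get_brand_rating_data (data : List (String × List (String × Int))) : List (Int × List Int) :=
  (data.foldl
    (fun rating_dct product =>
      let brand := pvLookup product.2 "brand"
      let rating := pvLookup product.2 "rating"
      let rating_dct :=
        if rating_dct.contains brand then rating_dct else rating_dct.insert brand []
      rating_dct.modify brand [] (fun l => l ++ [rating]))
    PySem.Dict.empty).items

-- ===== PORT B =====
def get_brand_rating_data_alt (data : List (String × List (String × Int))) : List (Int × List Int) :=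
  let brands := PySem.List.dedup (data.map (fun p => pvLookup p.2 "brand"))
  brands.map (fun b =>
    (b, (data.filter (fun p => pvLookup p.2 "brand" == b)).map (fun p => pvLookup p.2 "rating")))

-- ===== PRECONDITION & SPEC =====
-- Pre_ excludes association lists with duplicate keys (top-level or inside a product: those are not
-- faithful images of a Python dict, whose construction collapses duplicates), and products whose
-- inner dict lacks a 'brand' or 'rating' key, on which A raises KeyError.
def Pre_get_brand_rating_data (data : List (String × List (String × Int))) : Prop :=
  (data.map Prod.fst).Nodup ∧
  ∀ pr ∈ data, (pr.2.map Prod.fst).Nodup ∧ "brand" ∈ pr.2.map Prod.fst ∧ "rating" ∈ pr.2.map Prod.fst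
instance (data : List (String × List (String × Int))) : Decidable (Pre_get_brand_rating_data data) := by
  unfold Pre_get_brand_rating_data; infer_instance

def pvWitness_get_brand_rating_data : (List (String × List (String × Int))) :=
  [("p1", [("brand", 1), ("rating", 5)]), ("p2", [("brand", 1), ("rating", 3)]),
   ("p3", [("brand", 2), ("rating", 4)])]

def Spec_get_brand_rating_data (data : List (String × List (String × Int))) (out : List (Int × List Int)) : Prop := out = get_brand_rating_data_alt data
instance (data : List (String × List (String × Int))) (out : List (Int × List Int)) : Decidable (Spec_get_brand_rating_data data out) := by unfold Spec_get_brand_rating_data; infer_instance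

-- ===== CLAIM (what is proved, stated in full; the proofs are below) =====
def Claim_equal_get_brand_rating_data : Prop := ∀ (data : List (String × List (String × Int))), Dom_get_brand_rating_data data → Pre_get_brand_rating_data data → Spec_get_brand_rating_data data (get_brand_rating_data data)

-- ===== LEMMAS AND PROOFS =====

-- A's "if absent insert []; then append" step is one 'modify'
theorem step_eq_modify (d : PySem.Dict Int (List Int)) (b r : Int) :
    PySem.Dict.modify (if d.contains b then d else d.insert b []) b [] (fun l => l ++ [r])
      = d.modify b [] (fun l => l ++ [r]) := by
  by_cases h : d.contains b = true
  · rw [if_pos h]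
  · have h' : d.contains b = false := by simpa using h
    rw [if_neg h]
    unfold PySem.Dict.modify
    rw [PySem.Dict.getD_insert_self, PySem.Dict.getD_of_not_contains d [] h']
    have hnot : ∀ p ∈ d.items, (p.1 == b) = false := by
      intro p hp
      cases hpb : (p.1 == b) with
      | false => rfl
      | true =>
        exfalso
        have hc : d.contains b = true := by
          unfold PySem.Dict.contains
          exact List.any_eq_true.2 ⟨p, hp, hpb⟩
        rw [h'] at hc
        cases hc
    have hc2 : (d.insert b []).contains b = true := PySem.Dict.contains_insert_self d b []
    apply PySem.Dict.ext
    rw [PySem.Dict.items_insert_of_contains _ _ hc2,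
        PySem.Dict.items_insert_of_not_contains _ _ h',
        PySem.Dict.items_insert_of_not_contains _ _ h']
    rw [List.map_append]
    congr 1
    · trans (List.map id d.items)
      · exact List.map_congr_left (fun p hp => by simp [hnot p hp])
      · exact List.map_id d.items
    · simp

-- items of a Nodup-keyed dict, recovered from keys and getD
theorem items_eq_keys_map (d : PySem.Dict Int (List Int)) (h : d.keys.Nodup) :
    d.items = d.keys.map (fun k => (k, d.getD k [])) := by
  have : d.keys.map (fun k => (k, d.getD k [])) = d.items.map (fun p => (p.1, d.getD p.1 [])) := by
    simp [PySem.Dict.keys, List.map_map]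
  rw [this]
  symm
  calc d.items.map (fun p => (p.1, d.getD p.1 [])) = d.items.map id := by
        apply List.map_congr_left
        intro p hp
        have := PySem.Dict.getD_of_mem_items (d := d) (k := p.1) (v := p.2)
          (by simpa using hp) h (d0 := [])
        simp [this]
    _ = d.items := by simp

theorem get_brand_rating_data_spec : Claim_equal_get_brand_rating_data := by
  intro data _ _
  unfold Spec_get_brand_rating_data get_brand_rating_data get_brand_rating_data_alt
  -- collapse A's two-step body into a single modify
  have hbody : (data.foldl
      (fun rating_dct product =>
        let brand := pvLookup product.2 "brand"
        let rating := pvLookup product.2 "rating"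
        let rating_dct :=
          if rating_dct.contains brand then rating_dct else rating_dct.insert brand []
        rating_dct.modify brand [] (fun l => l ++ [rating]))
      PySem.Dict.empty)
      = (data.map (fun p => (pvLookup p.2 "brand", pvLookup p.2 "rating"))).foldl
          (fun d q => d.modify q.1 [] (fun l => l ++ [q.2])) PySem.Dict.empty := by
    rw [List.foldl_map]
    have hf : (fun (rating_dct : PySem.Dict Int (List Int)) (product : String × List (String × Int)) =>
        let brand := pvLookup product.2 "brand"
        let rating := pvLookup product.2 "rating"
        let rating_dct :=
          if rating_dct.contains brand then rating_dct else rating_dct.insert brand []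
        rating_dct.modify brand [] (fun l => l ++ [rating]))
        = (fun d p => PySem.Dict.modify d (pvLookup p.2 "brand") [] (fun l => l ++ [pvLookup p.2 "rating"])) := by
      funext d p
      exact step_eq_modify d (pvLookup p.2 "brand") (pvLookup p.2 "rating")
    rw [hf]
  rw [hbody]
  set l := data.map (fun p => (pvLookup p.2 "brand", pvLookup p.2 "rating")) with hl
  set D := l.foldl (fun d q => d.modify q.1 [] (fun ll => ll ++ [q.2])) PySem.Dict.empty with hD
  have hnodup : D.keys.Nodup := by
    rw [hD]
    exact PySem.Dict.nodup_keys_foldl_modify_key l Prod.fst [] (fun d q => fun ll => ll ++ [q.2])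
      PySem.Dict.empty (by simp)
  have hkeys : D.keys = PySem.List.dedup (data.map (fun p => pvLookup p.2 "brand")) := by
    rw [hD]
    rw [PySem.Dict.keys_foldl_modify_key]
    simp [PySem.Set.update, PySem.List.dedup_eq_ofList, PySem.Set.ofList_eq_foldl, hl,
      List.map_map, PySem.Dict.keys_empty, Function.comp_def]
  have hgetD : ∀ b : Int, D.getD b []
      = (data.filter (fun p => pvLookup p.2 "brand" == b)).map (fun p => pvLookup p.2 "rating") := by
    intro b
    rw [hD, PySem.Dict.getD_foldl_modify_append]
    simp [hl, List.filter_map, List.map_map, Function.comp_def]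
  rw [items_eq_keys_map D hnodup, hkeys]
  apply List.map_congr_left
  intro b _
  rw [hgetD b]
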